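-- pv_equiv track=rewrite | github.com/Kolja-05/Wordle_solver | solver.py | color_positions
-- ===== SOURCE A (Python) =====
-- def color_positions(guess, colors):
--     letter_feedback = {}
--
--     for idx, letter in enumerate(guess):
--         if letter not in letter_feedback:
--             letter_feedback[letter] = {"b_pos": [], "y_pos": [], "g_pos": []}
--         if colors[idx] == "B":
--             letter_feedback[letter]["b_pos"].append(idx)
--         elif colors[idx] == "Y":
--             letter_feedback[letter]["y_pos"].append(idx)
--         elif colors[idx] == "G":
--             letter_feedback[letter]["g_pos"].append(idx)
--     return letter_feedback
-- ===== SOURCE B (Python) =====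
-- def color_positions(guess, colors):
--     return {
--         letter: {
--             "b_pos": [i for i, l in enumerate(guess) if l == letter and colors[i] == "B"],
--             "y_pos": [i for i, l in enumerate(guess) if l == letter and colors[i] == "Y"],
--             "g_pos": [i for i, l in enumerate(guess) if l == letter and colors[i] == "G"],
--         }
--         for letter in dict.fromkeys(guess)
--     }
-- ===== Notes on version B (the rewrite author's own statement) =====
-- stated objective: alternative
-- what changed: Replaces A's single accumulating pass that mutates nested dict entries per index with an index-letters-first decomposition: build the ordered set of distinct letters (dict.fromkeys), then for each letter classify the positions with three comprehensions over enumerate(guess).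
import Mathlib
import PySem

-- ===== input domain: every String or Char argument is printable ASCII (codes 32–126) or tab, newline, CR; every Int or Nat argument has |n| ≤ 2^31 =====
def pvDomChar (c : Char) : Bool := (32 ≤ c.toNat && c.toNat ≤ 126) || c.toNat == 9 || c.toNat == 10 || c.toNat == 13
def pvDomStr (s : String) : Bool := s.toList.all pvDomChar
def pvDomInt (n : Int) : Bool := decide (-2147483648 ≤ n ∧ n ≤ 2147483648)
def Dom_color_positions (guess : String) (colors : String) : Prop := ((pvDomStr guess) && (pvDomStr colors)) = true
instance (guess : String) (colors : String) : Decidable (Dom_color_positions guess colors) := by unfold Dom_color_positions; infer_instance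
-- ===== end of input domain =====

-- B groups positions per distinct letter with per-color comprehensions instead of A's single
-- mutating pass; objective: alternative decomposition (same exact result).

-- ===== PORT A =====
-- the fresh inner dict {"b_pos": [], "y_pos": [], "g_pos": []}
def pvEmptyEntry : PySem.Dict String (List Int) :=
  PySem.Dict.mk [("b_pos", []), ("y_pos", []), ("g_pos", [])]

-- one iteration of A's loop body (idx, letter) = p; 'colors[idx]' is PySem.Str.pyGet?
-- (none = IndexError, excluded by Pre_); letter_feedback[letter][slot].append(idx) is the
-- inner Dict.modify (the key is always present when reached, so the default is never used)
def pvStepA (colors : String) (d : PySem.Dict String (PySem.Dict String (List Int)))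
    (p : Int × Char) : PySem.Dict String (PySem.Dict String (List Int)) :=
  let letter := String.ofList [p.2]
  let d' := if d.contains letter then d else d.insert letter pvEmptyEntry
  match PySem.Str.pyGet? colors p.1 with
  | none => d'
  | some ch =>
    if ch = 'B' then d'.modify letter PySem.Dict.empty (fun v => v.modify "b_pos" [] (· ++ [p.1]))
    else if ch = 'Y' then d'.modify letter PySem.Dict.empty (fun v => v.modify "y_pos" [] (· ++ [p.1]))
    else if ch = 'G' then d'.modify letter PySem.Dict.empty (fun v => v.modify "g_pos" [] (· ++ [p.1]))
    else d'

def color_positions (guess : String) (colors : String) : List (String × List (String × List Int)) :=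
  (((PySem.List.enumerate guess.toList).foldl (pvStepA colors) PySem.Dict.empty).items).map
    (fun p => (p.1, p.2.items))

-- ===== PORT B =====
-- [i for i, l in enumerate(guess) if l == letter and colors[i] == col]
-- ('and' short-circuits: colors[i] is only read when l == letter; none = IndexError, excluded by Pre_)
def pvClassify (guess : List Char) (colors : String) (letter : Char) (col : Char) : List Int :=
  (PySem.List.enumerate guess).filterMap (fun p =>
    if p.2 = letter then
      match PySem.Str.pyGet? colors p.1 with
      | none => none
      | some ch => if ch = col then some p.1 else none
    else none)

def color_positions_alt (guess : String) (colors : String) : List (String × List (String × List Int)) :=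
  (PySem.List.dedup guess.toList).map (fun letter =>
    (String.ofList [letter],
     [("b_pos", pvClassify guess.toList colors letter 'B'),
      ("y_pos", pvClassify guess.toList colors letter 'Y'),
      ("g_pos", pvClassify guess.toList colors letter 'G')]))

-- ===== PRECONDITION & SPEC =====
-- A raises IndexError (colors[idx]) as soon as an index of guess is not an index of colors;
-- Pre_ excludes exactly those inputs (B raises there too).
def Pre_color_positions (guess : String) (colors : String) : Prop :=
  guess.toList.length ≤ colors.toList.length
instance (guess : String) (colors : String) : Decidable (Pre_color_positions guess colors) := by
  unfold Pre_color_positions; infer_instance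

def pvWitness_color_positions : String × String := ("aba", "BYG")

def Spec_color_positions (guess : String) (colors : String) (out : List (String × List (String × List Int))) : Prop := out = color_positions_alt guess colors
instance (guess : String) (colors : String) (out : List (String × List (String × List Int))) : Decidable (Spec_color_positions guess colors out) := by unfold Spec_color_positions; infer_instance

-- ===== CLAIM (what is proved, stated in full; the proofs are below) =====
def Claim_equal_color_positions : Prop := ∀ (guess : String) (colors : String), Dom_color_positions guess colors → Pre_color_positions guess colors → Spec_color_positions guess colors (color_positions guess colors)

-- ===== LEMMAS AND PROOFS =====

-- the value B stores for a letter, as the inner Dict A maintains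
def pvEntry (g : List Char) (colors : String) (letter : Char) : PySem.Dict String (List Int) :=
  PySem.Dict.mk [("b_pos", pvClassify g colors letter 'B'),
                 ("y_pos", pvClassify g colors letter 'Y'),
                 ("g_pos", pvClassify g colors letter 'G')]

lemma pvDedup_append (g : List Char) (x : Char) :
    PySem.List.dedup (g ++ [x]) =
      if x ∈ g then PySem.List.dedup g else PySem.List.dedup g ++ [x] := by
  simp [PySem.List.dedup, PySem.Set.ofList_append, PySem.Set.update_cons, PySem.Set.update_nil,
    PySem.Set.add, PySem.Set.mem_ofList]

lemma pvClassify_append (g : List Char) (x : Char) (colors : String) (letter col : Char)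
    (cx : Char) (hcx : PySem.Str.pyGet? colors ((g.length : Nat) : Int) = some cx) :
    pvClassify (g ++ [x]) colors letter col =
      pvClassify g colors letter col ++
        (if x = letter ∧ cx = col then [((g.length : Nat) : Int)] else []) := by
  have hcx' : colors.toList[g.length]? = some cx := by simpa using hcx
  unfold pvClassify
  rw [PySem.List.enumerate_append, List.filterMap_append]
  congr 1
  simp only [PySem.List.enumerate, zero_add]
  by_cases hx : x = letter
  · subst hx
    by_cases hc : cx = col <;> simp [hcx', hc]
  · simp [hx]

lemma pvClassify_not_mem (g : List Char) (colors : String) (letter col : Char)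
    (h : letter ∉ g) : pvClassify g colors letter col = [] := by
  unfold pvClassify
  rw [List.filterMap_eq_nil_iff]
  intro p hp
  rw [PySem.List.mem_enumerate_iff] at hp
  obtain ⟨k, hk, rfl⟩ := hp
  have : g[k] ≠ letter := by
    intro he; exact h (he ▸ List.getElem_mem hk)
  simp [this]

-- lookup in the mapped dict: keys are distinct singleton strings
lemma pvContains_map (l : List Char) (f : Char → PySem.Dict String (List Int)) (x : Char) :
    (PySem.Dict.mk (l.map (fun a => (String.ofList [a], f a)))).contains (String.ofList [x])
      = decide (x ∈ l) := by
  induction l with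
  | nil => simp [PySem.Dict.contains_mk]
  | cons a t ih =>
    simp only [List.map_cons, PySem.Dict.contains_mk, List.any_cons] at *
    rw [ih]
    by_cases hax : a = x
    · subst hax; simp
    · have : (String.ofList [a] == String.ofList [x]) = false := by
        simp [String.ofList_inj, hax]
      simp only [this, Bool.false_or]
      congr 1
      simp [List.mem_cons, Ne.symm hax]

lemma pvGetD_map (l : List Char) (hl : l.Nodup) (f : Char → PySem.Dict String (List Int))
    (x : Char) (hx : x ∈ l) :
    (PySem.Dict.mk (l.map (fun a => (String.ofList [a], f a)))).getD (String.ofList [x])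
      PySem.Dict.empty = f x := by
  apply PySem.Dict.getD_of_mem_items
  · exact List.mem_map_of_mem hx
  · show (List.map _ (l.map _)).Nodup
    rw [List.map_map]
    exact hl.map (fun a b h => by simpa [String.ofList_inj] using h)

-- the inner-dict updates A performs, computed on pvEntry
lemma pvEntry_modify_b (g : List Char) (colors : String) (x : Char) (i : Int) :
    (pvEntry g colors x).modify "b_pos" [] (· ++ [i]) =
      PySem.Dict.mk [("b_pos", pvClassify g colors x 'B' ++ [i]),
                     ("y_pos", pvClassify g colors x 'Y'),
                     ("g_pos", pvClassify g colors x 'G')] := by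
  simp [pvEntry, PySem.Dict.modify, PySem.Dict.insert, PySem.Dict.getD, PySem.Dict.get?,
    PySem.Dict.contains]

lemma pvEntry_modify_y (g : List Char) (colors : String) (x : Char) (i : Int) :
    (pvEntry g colors x).modify "y_pos" [] (· ++ [i]) =
      PySem.Dict.mk [("b_pos", pvClassify g colors x 'B'),
                     ("y_pos", pvClassify g colors x 'Y' ++ [i]),
                     ("g_pos", pvClassify g colors x 'G')] := by
  simp [pvEntry, PySem.Dict.modify, PySem.Dict.insert, PySem.Dict.getD, PySem.Dict.get?,
    PySem.Dict.contains]

lemma pvEntry_modify_g (g : List Char) (colors : String) (x : Char) (i : Int) :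
    (pvEntry g colors x).modify "g_pos" [] (· ++ [i]) =
      PySem.Dict.mk [("b_pos", pvClassify g colors x 'B'),
                     ("y_pos", pvClassify g colors x 'Y'),
                     ("g_pos", pvClassify g colors x 'G' ++ [i])] := by
  simp [pvEntry, PySem.Dict.modify, PySem.Dict.insert, PySem.Dict.getD, PySem.Dict.get?,
    PySem.Dict.contains]

-- entries of letters other than x are unchanged by appending x
lemma pvEntry_append_ne (g : List Char) (x : Char) (colors : String) (a : Char)
    (cx : Char) (hcx : PySem.Str.pyGet? colors ((g.length : Nat) : Int) = some cx)
    (hax : a ≠ x) : pvEntry (g ++ [x]) colors a = pvEntry g colors a := by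
  unfold pvEntry
  rw [pvClassify_append g x colors a 'B' cx hcx, pvClassify_append g x colors a 'Y' cx hcx,
    pvClassify_append g x colors a 'G' cx hcx]
  simp [Ne.symm hax]

lemma pvGetD_append_last {ν : Type} (l : List (String × ν)) (k : String) (v : ν) (d0 : ν)
    (h : ∀ p ∈ l, p.1 ≠ k) :
    (PySem.Dict.mk (l ++ [(k, v)])).getD k d0 = v := by
  have hnone : l.find? (fun p => p.1 == k) = none :=
    List.find?_eq_none.2 (fun p hp => by simp [h p hp])
  simp [PySem.Dict.getD, PySem.Dict.get?, List.find?_append, hnone]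

lemma pvInsert_map (l : List Char) (f : Char → PySem.Dict String (List Int)) (x : Char)
    (hx : x ∈ l) (v : PySem.Dict String (List Int)) :
    (PySem.Dict.mk (l.map (fun a => (String.ofList [a], f a)))).insert (String.ofList [x]) v
      = PySem.Dict.mk (l.map (fun a => (String.ofList [a], if a = x then v else f a))) := by
  rw [PySem.Dict.insert]
  rw [pvContains_map]
  simp only [hx, decide_true, if_true]
  show PySem.Dict.mk (List.map _ (l.map _)) = _
  rw [List.map_map]
  congr 1
  apply List.map_congr_left
  intro a _
  by_cases hax : a = x
  · subst hax; simp
  · have : (String.ofList [a] == String.ofList [x]) = false := by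
      simp [String.ofList_inj, hax]
    simp only [Function.comp_def]
    rw [this]
    simp [hax]

-- a letter not occurring yet has the fresh empty entry
lemma pvEntry_not_mem (g : List Char) (colors : String) (x : Char) (h : x ∉ g) :
    pvEntry g colors x = pvEmptyEntry := by
  unfold pvEntry pvEmptyEntry
  rw [pvClassify_not_mem g colors x 'B' h, pvClassify_not_mem g colors x 'Y' h,
    pvClassify_not_mem g colors x 'G' h]

-- one step of A's fold preserves the invariant
lemma pvStep_main (colors : String) (g : List Char) (x : Char) (cx : Char)
    (hcx : PySem.Str.pyGet? colors ((g.length : Nat) : Int) = some cx) :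
    pvStepA colors
        (PySem.Dict.mk ((PySem.List.dedup g).map (fun a => (String.ofList [a], pvEntry g colors a))))
        (((g.length : Nat) : Int), x)
      = PySem.Dict.mk ((PySem.List.dedup (g ++ [x])).map
          (fun a => (String.ofList [a], pvEntry (g ++ [x]) colors a))) := by
  have hnd : (PySem.List.dedup g).Nodup := PySem.List.nodup_dedup g
  have hmem : ∀ a, a ∈ PySem.List.dedup g ↔ a ∈ g := fun a => PySem.List.mem_dedup g a
  have hEntB := fun letter => pvClassify_append g x colors letter 'B' cx hcx
  have hEntY := fun letter => pvClassify_append g x colors letter 'Y' cx hcx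
  have hEntG := fun letter => pvClassify_append g x colors letter 'G' cx hcx
  simp only [pvStepA]
  rw [hcx, pvContains_map, pvDedup_append]
  by_cases hx : x ∈ g
  · -- letter already present: no insert, possibly a modify
    have hxd : x ∈ PySem.List.dedup g := (hmem x).2 hx
    simp only [hx, hxd, decide_true, if_true]
    have hgetD := pvGetD_map (PySem.List.dedup g) hnd (pvEntry g colors) x hxd
    have hsame : ∀ a ∈ PySem.List.dedup g, a ≠ x →
        pvEntry (g ++ [x]) colors a = pvEntry g colors a :=
      fun a _ hax => pvEntry_append_ne g x colors a cx hcx hax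
    by_cases hB : cx = 'B'
    · subst hB
      simp only [if_true]
      rw [PySem.Dict.modify, hgetD, pvEntry_modify_b, pvInsert_map _ _ x hxd]
      congr 1
      apply List.map_congr_left
      intro a ha
      by_cases hax : a = x
      · subst hax
        simp only [if_true]
        unfold pvEntry
        rw [hEntB a, hEntY a, hEntG a]
        simp
      · rw [if_neg hax, hsame a ha hax]
    · by_cases hY : cx = 'Y'
      · subst hY
        simp only [hB, if_false, if_true]
        rw [PySem.Dict.modify, hgetD, pvEntry_modify_y, pvInsert_map _ _ x hxd]
        congr 1
        apply List.map_congr_left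
        intro a ha
        by_cases hax : a = x
        · subst hax
          simp only [if_true]
          unfold pvEntry
          rw [hEntB a, hEntY a, hEntG a]
          simp
        · rw [if_neg hax, hsame a ha hax]
      · by_cases hG : cx = 'G'
        · subst hG
          simp only [hB, hY, if_false, if_true]
          rw [PySem.Dict.modify, hgetD, pvEntry_modify_g, pvInsert_map _ _ x hxd]
          congr 1
          apply List.map_congr_left
          intro a ha
          by_cases hax : a = x
          · subst hax
            simp only [if_true]
            unfold pvEntry
            rw [hEntB a, hEntY a, hEntG a]
            simp
          · rw [if_neg hax, hsame a ha hax]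
        · -- colors[idx] is none of B/Y/G: nothing changes
          simp only [hB, hY, hG, if_false]
          congr 1
          apply List.map_congr_left
          intro a ha
          by_cases hax : a = x
          · subst hax
            unfold pvEntry
            rw [hEntB a, hEntY a, hEntG a]
            simp [hB, hY, hG]
          · rw [pvEntry_append_ne g x colors a cx hcx hax]
  · -- fresh letter: an insert of the empty entry, then possibly a modify
    have hxd : x ∉ PySem.List.dedup g := fun h => hx ((hmem x).1 h)
    simp only [hx, hxd, decide_false, Bool.false_eq_true, if_false]
    have hcont : (PySem.Dict.mk ((PySem.List.dedup g).map
        (fun a => (String.ofList [a], pvEntry g colors a)))).contains (String.ofList [x]) = false := by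
      rw [pvContains_map]; simp [hx, hxd]
    have hins : (PySem.Dict.mk ((PySem.List.dedup g).map
          (fun a => (String.ofList [a], pvEntry g colors a)))).insert (String.ofList [x]) pvEmptyEntry
        = PySem.Dict.mk ((PySem.List.dedup g).map
            (fun a => (String.ofList [a], pvEntry g colors a)) ++ [(String.ofList [x], pvEmptyEntry)]) := by
      apply PySem.Dict.ext
      rw [PySem.Dict.items_insert_of_not_contains _ _ hcont]
    have hsame : List.map (fun a => (String.ofList [a], pvEntry (g ++ [x]) colors a)) (PySem.List.dedup g)
        = List.map (fun a => (String.ofList [a], pvEntry g colors a)) (PySem.List.dedup g) := by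
      apply List.map_congr_left
      intro a ha
      have hax : a ≠ x := fun he => hx (he ▸ (hmem a).1 ha)
      rw [pvEntry_append_ne g x colors a cx hcx hax]
    have hxEnt : pvEntry g colors x = pvEmptyEntry := pvEntry_not_mem g colors x hx
    have hEntX : pvEntry (g ++ [x]) colors x = PySem.Dict.mk
        [("b_pos", if cx = 'B' then [((g.length : Nat) : Int)] else []),
         ("y_pos", if cx = 'Y' then [((g.length : Nat) : Int)] else []),
         ("g_pos", if cx = 'G' then [((g.length : Nat) : Int)] else [])] := by
      unfold pvEntry
      rw [hEntB x, hEntY x, hEntG x, pvClassify_not_mem g colors x 'B' hx,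
        pvClassify_not_mem g colors x 'Y' hx, pvClassify_not_mem g colors x 'G' hx]
      simp
    rw [hins, List.map_append, hsame]
    have hgetD : (PySem.Dict.mk ((PySem.List.dedup g).map
          (fun a => (String.ofList [a], pvEntry g colors a)) ++ [(String.ofList [x], pvEmptyEntry)])).getD
        (String.ofList [x]) PySem.Dict.empty = pvEmptyEntry := by
      apply pvGetD_append_last
      intro p hp
      simp only [List.mem_map] at hp
      obtain ⟨a, ha, rfl⟩ := hp
      simp only [String.ofList_inj, List.cons.injEq, and_true, ne_eq]
      exact fun he => hxd (he ▸ ha)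
    have hsingle : List.map (fun a => (String.ofList [a], pvEntry g colors a)) (PySem.List.dedup g)
          ++ [(String.ofList [x], pvEntry g colors x)]
        = (PySem.List.dedup g ++ [x]).map (fun a => (String.ofList [a], pvEntry g colors a)) := by
      simp
    have hclsB := pvClassify_not_mem g colors x 'B' hx
    have hclsY := pvClassify_not_mem g colors x 'Y' hx
    have hclsG := pvClassify_not_mem g colors x 'G' hx
    by_cases hB : cx = 'B'
    · subst hB
      simp only [if_true]
      rw [PySem.Dict.modify, hgetD, ← hxEnt, pvEntry_modify_b, hsingle,
        pvInsert_map (PySem.List.dedup g ++ [x]) (pvEntry g colors) x (by simp), List.map_append]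
      congr 1
      congr 1
      · apply List.map_congr_left
        intro a ha
        have hax : a ≠ x := fun he => hxd (he ▸ ha)
        rw [if_neg hax]
      · simp only [List.map_cons, List.map_nil]
        rw [hEntX, hclsB, hclsY, hclsG]
        simp
    · by_cases hY : cx = 'Y'
      · subst hY
        simp only [hB, if_false, if_true]
        rw [PySem.Dict.modify, hgetD, ← hxEnt, pvEntry_modify_y, hsingle,
          pvInsert_map (PySem.List.dedup g ++ [x]) (pvEntry g colors) x (by simp), List.map_append]
        congr 1
        congr 1
        · apply List.map_congr_left
          intro a ha
          have hax : a ≠ x := fun he => hxd (he ▸ ha)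
          rw [if_neg hax]
        · simp only [List.map_cons, List.map_nil]
          rw [hEntX, hclsB, hclsY, hclsG]
          simp
      · by_cases hG : cx = 'G'
        · subst hG
          simp only [hB, hY, if_false, if_true]
          rw [PySem.Dict.modify, hgetD, ← hxEnt, pvEntry_modify_g, hsingle,
            pvInsert_map (PySem.List.dedup g ++ [x]) (pvEntry g colors) x (by simp), List.map_append]
          congr 1
          congr 1
          · apply List.map_congr_left
            intro a ha
            have hax : a ≠ x := fun he => hxd (he ▸ ha)
            rw [if_neg hax]
          · simp only [List.map_cons, List.map_nil]
            rw [hEntX, hclsB, hclsY, hclsG]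
            simp
        · simp only [hB, hY, hG, if_false]
          simp only [List.map_cons, List.map_nil]
          rw [hEntX]
          simp [pvEmptyEntry, hB, hY, hG]

-- the loop invariant: A's fold over the enumerated prefix is B's map over the distinct letters
lemma pvLoop (colors : String) (g : List Char) (h : g.length ≤ colors.toList.length) :
    (PySem.List.enumerate g).foldl (pvStepA colors) PySem.Dict.empty
      = PySem.Dict.mk ((PySem.List.dedup g).map (fun a => (String.ofList [a], pvEntry g colors a))) := by
  induction g using List.reverseRecOn with
  | nil => rfl
  | append_singleton g x ih =>
    have hlen := h
    rw [List.length_append, List.length_cons, List.length_nil] at hlen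
    have hg : g.length ≤ colors.toList.length := by omega
    have hlt : g.length < colors.toList.length := by omega
    have hcx : PySem.Str.pyGet? colors ((g.length : Nat) : Int) = some colors.toList[g.length] := by
      rw [PySem.Str.pyGet?_natCast]
      exact List.getElem?_eq_getElem hlt
    rw [PySem.List.enumerate_append, List.foldl_append, ih hg]
    have : PySem.List.enumerate [x] (0 + (g.length : Int)) = [(((g.length : Nat) : Int), x)] := by
      simp [PySem.List.enumerate]
    rw [this]
    simpa using pvStep_main colors g x colors.toList[g.length] hcx

-- ===== VERDICT (by name: the statement is the Claim_ definition above) =====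
theorem color_positions_spec : Claim_equal_color_positions := by
  intro guess colors _ hpre
  unfold Spec_color_positions color_positions color_positions_alt
  rw [pvLoop colors guess.toList hpre]
  show (List.map _ (List.map _ _)) = _
  rw [List.map_map]
  rfl
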